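-- pv_equiv track=rewrite | github.com/Scientific-Artificial-Intelligence-Lab/kd | kd/model/eqgpt/continue_train_GPT.py | get_sub_set
-- ===== SOURCE A (Python) =====
-- def get_sub_set(nums):
--     sub_sets = [[]]
--     for i in range(len(nums)):
--         x=nums[i]
--         sub_sets.extend([item + [x] for item in sub_sets])
--     sub_sets.pop(0)
--     sub_sets.pop(-1)
--     return sub_sets
-- ===== SOURCE B (Python) =====
-- def get_sub_set(nums):
--     n = len(nums)
--     sub_sets = [[nums[i] for i in range(n) if (mask >> i) & 1] for mask in range(1 << n)]
--     sub_sets.pop(0)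
--     sub_sets.pop(-1)
--     return sub_sets
-- ===== Notes on version B (the rewrite author's own statement) =====
-- stated objective: idiomatic
-- what changed: B enumerates bitmasks 0..2**n-1 and builds each subset directly by bit tests in one comprehension, instead of A's in-place list doubling that extends the accumulator once per element.
-- outside the precondition, e.g. on get_sub_set([]): A raises IndexError, B raises IndexError
import Mathlib
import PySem

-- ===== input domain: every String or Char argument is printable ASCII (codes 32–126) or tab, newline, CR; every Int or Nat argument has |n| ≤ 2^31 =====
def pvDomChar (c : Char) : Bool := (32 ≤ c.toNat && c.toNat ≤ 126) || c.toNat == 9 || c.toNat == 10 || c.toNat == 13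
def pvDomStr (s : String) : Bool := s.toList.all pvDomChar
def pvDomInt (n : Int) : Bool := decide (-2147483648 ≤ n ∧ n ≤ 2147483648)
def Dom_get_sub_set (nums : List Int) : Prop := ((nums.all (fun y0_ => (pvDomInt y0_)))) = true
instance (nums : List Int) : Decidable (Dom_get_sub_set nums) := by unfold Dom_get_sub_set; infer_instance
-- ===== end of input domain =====

-- B enumerates bitmasks 0..2^n-1 and builds each subset by bit test (idiomatic power-set
-- construction) instead of A's incremental list doubling; same value everywhere A returns.


-- ===== PORT A =====
def get_sub_set (nums : List Int) : List (List Int) :=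
  -- sub_sets = [[]]; for i in range(len(nums)): x = nums[i]; sub_sets.extend([item + [x] for item in sub_sets])
  let sub_sets := (PySem.List.pyRange 0 (nums.length : Int) 1).foldl
    (fun ss i =>
      let x := PySem.List.pyGetD nums i 0  -- nums[i]; i is always in range here
      ss ++ ss.map (fun item => item ++ [x])) [[]]
  -- sub_sets.pop(0); sub_sets.pop(-1)  (pop on an empty list raises: excluded by Pre_)
  match PySem.List.pop? sub_sets 0 with
  | none => []
  | some (_, ss1) =>
    match PySem.List.pop? ss1 (-1) with
    | none => []
    | some (_, ss2) => ss2

-- ===== PORT B =====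
-- [nums[i] for i in range(n) if (mask >> i) & 1]   ((mask >> i) & 1 == 1  is  Nat.testBit mask i)
def maskSubset (nums : List Int) (mask : Nat) : List Int :=
  (List.range nums.length).filterMap
    (fun i => if mask.testBit i then PySem.List.pyGet? nums (i : Int) else none)

def get_sub_set_alt (nums : List Int) : List (List Int) :=
  -- [ ... for mask in range(1 << n)]
  let sub_sets := (List.range (2 ^ nums.length)).map (maskSubset nums)
  match PySem.List.pop? sub_sets 0 with
  | none => []
  | some (_, ss1) =>
    match PySem.List.pop? ss1 (-1) with
    | none => []
    | some (_, ss2) => ss2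

-- ===== PRECONDITION & SPEC =====
-- On nums = [] the Python A (and B) raise IndexError at sub_sets.pop(-1); Pre_ excludes exactly that input.
def Pre_get_sub_set (nums : List Int) : Prop := nums ≠ []
instance (nums : List Int) : Decidable (Pre_get_sub_set nums) := by unfold Pre_get_sub_set; infer_instance
def pvWitness_get_sub_set : List Int := ([1, 2])

def Spec_get_sub_set (nums : List Int) (out : List (List Int)) : Prop := out = get_sub_set_alt nums
instance (nums : List Int) (out : List (List Int)) : Decidable (Spec_get_sub_set nums out) := by unfold Spec_get_sub_set; infer_instance

-- ===== CLAIM (what is proved, stated in full; the proofs are below) =====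
def Claim_equal_get_sub_set : Prop := ∀ (nums : List Int), Dom_get_sub_set nums → Pre_get_sub_set nums → Spec_get_sub_set nums (get_sub_set nums)

-- ===== LEMMAS AND PROOFS =====

-- A's index loop is a fold over the list itself
theorem foldA_eq_foldl (nums : List Int) :
    (PySem.List.pyRange 0 (nums.length : Int) 1).foldl
      (fun ss i =>
        let x := PySem.List.pyGetD nums i 0
        ss ++ ss.map (fun item => item ++ [x])) ([[]] : List (List Int))
    = nums.foldl (fun ss x => ss ++ ss.map (fun item => item ++ [x])) [[]] := by
  exact PySem.List.foldl_pyRange_zero_pyGetD nums 0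
    (fun ss x => ss ++ ss.map (fun item => item ++ [x])) [[]]

theorem maskSubset_append_lt (nums : List Int) (x : Int) (m : Nat)
    (hm : m < 2 ^ nums.length) :
    maskSubset (nums ++ [x]) m = maskSubset nums m := by
  unfold maskSubset
  rw [List.length_append, List.length_singleton, List.range_succ, List.filterMap_append]
  have h2 : m.testBit nums.length = false := Nat.testBit_eq_false_of_lt hm
  simp only [List.filterMap_cons, List.filterMap_nil, h2, Bool.false_eq_true, if_false,
    List.append_nil]
  apply List.filterMap_congr
  intro i hi
  have hilt : i < nums.length := List.mem_range.mp hi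
  simp [PySem.List.pyGet?_natCast, List.getElem?_append_left hilt]

theorem maskSubset_append_add (nums : List Int) (x : Int) (m : Nat)
    (hm : m < 2 ^ nums.length) :
    maskSubset (nums ++ [x]) (2 ^ nums.length + m) = maskSubset nums m ++ [x] := by
  unfold maskSubset
  rw [List.length_append, List.length_singleton, List.range_succ, List.filterMap_append]
  have h2 : (2 ^ nums.length + m).testBit nums.length = true := by
    rw [Nat.testBit_two_pow_add_eq, Nat.testBit_eq_false_of_lt hm]; rfl
  have h3 : (nums ++ [x])[nums.length]? = some x := by
    simp
  simp only [List.filterMap_cons, List.filterMap_nil, h2, if_true,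
    PySem.List.pyGet?_natCast, h3]
  congr 1
  apply List.filterMap_congr
  intro i hi
  have hilt : i < nums.length := List.mem_range.mp hi
  rw [Nat.testBit_two_pow_add_gt hilt]
  simp [List.getElem?_append_left hilt]

theorem doubling_eq_masks (nums : List Int) :
    nums.foldl (fun ss x => ss ++ ss.map (fun item => item ++ [x])) [[]]
    = (List.range (2 ^ nums.length)).map (maskSubset nums) := by
  induction nums using List.reverseRecOn with
  | nil => simp [maskSubset]
  | append_singleton nums x ih =>
    rw [List.foldl_append, ih]
    simp only [List.foldl_cons, List.foldl_nil]
    rw [List.length_append, List.length_singleton, pow_succ, mul_two, List.range_add]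
    rw [List.map_append, List.map_map, List.map_map]
    congr 1
    · apply List.map_congr_left
      intro m hm
      exact (maskSubset_append_lt nums x m (List.mem_range.mp hm)).symm
    · apply List.map_congr_left
      intro m hm
      have := maskSubset_append_add nums x m (List.mem_range.mp hm)
      simp only [Function.comp]
      rw [this]

-- ===== VERDICT (by name: the statement is the Claim_ definition above) =====
theorem get_sub_set_spec : Claim_equal_get_sub_set := by
  intro nums _ _
  unfold Spec_get_sub_set get_sub_set get_sub_set_alt
  rw [foldA_eq_foldl, doubling_eq_masks]
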